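-- pv_equiv track=rewrite | github.com/DavidivoWang/tonesoul-mirrortone | scripts/run_collaborator_beta_preflight.py | _normalize_compact_diagnostic
-- ===== SOURCE A (Python) =====
-- def _normalize_compact_diagnostic(text: str) -> str:
--     lines = [line.strip() for line in str(text).splitlines() if line.strip()]
--     filtered = [line for line in lines if not line.startswith("[ToneSoul] Storage:")]
--     if filtered:
--         return filtered[0]
--     if lines:
--         return lines[0]
--     return ""
-- ===== SOURCE B (Python) =====
-- def _normalize_compact_diagnostic(text: str) -> str:
--     # Selection by ordering: tag each non-empty stripped line with
--     # (is_storage_line, original_index) and pick the minimum tuple -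
--     # any non-storage line outranks every storage line, ties broken by
--     # position, so min() yields exactly the wanted line in one selection.
--     prefix = "[ToneSoul] Storage:"
--     candidates = [(s.startswith(prefix), i, s)
--                   for i, line in enumerate(str(text).splitlines())
--                   if (s := line.strip())]
--     if not candidates:
--         return ""
--     return min(candidates)[2]
-- ===== Notes on version B (the rewrite author's own statement) =====
-- stated objective: alternative
-- what changed: Replaces the two staged filter passes (non-empty lines, then non-storage lines, with an indexed fallback) by a single keyed selection: each non-empty stripped line is tagged (is_storage, index) and min() over these tuples picks the answer.
import Mathlib
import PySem

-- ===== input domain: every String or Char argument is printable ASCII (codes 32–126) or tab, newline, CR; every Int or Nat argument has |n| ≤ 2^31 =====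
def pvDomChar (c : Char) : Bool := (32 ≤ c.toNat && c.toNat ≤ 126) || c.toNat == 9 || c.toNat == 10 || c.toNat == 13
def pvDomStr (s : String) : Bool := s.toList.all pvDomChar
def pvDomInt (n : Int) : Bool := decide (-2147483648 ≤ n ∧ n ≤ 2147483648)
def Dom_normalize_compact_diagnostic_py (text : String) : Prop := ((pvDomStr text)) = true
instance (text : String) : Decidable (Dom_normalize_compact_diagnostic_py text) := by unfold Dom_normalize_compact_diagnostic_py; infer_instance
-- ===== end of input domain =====

-- B replaces A's two staged filter passes by a single keyed selection:
-- each non-empty stripped line is tagged (is_storage, index) and min() over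
-- the tuples picks the answer (objective: alternative, same cost).

-- ===== PORT A =====
def normalize_compact_diagnostic_py (text : String) : String :=
  let lines := ((PySem.Str.splitlines text).filter
      (fun line => PySem.Str.strip line ≠ "")).map PySem.Str.strip
  let filtered := lines.filter
      (fun line => ¬ (PySem.Str.startswith line "[ToneSoul] Storage:" = true))
  match filtered with
  | f :: _ => f
  | [] =>
    match lines with
    | l :: _ => l
    | [] => ""

-- ===== PORT B =====
-- the candidate list of Source B: (s.startswith(prefix), i, s) for non-empty stripped s
def pvCand : Nat → List String → List (Bool × Nat × String)
  | _, [] => []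
  | i, l :: rest =>
    let s := PySem.Str.strip l
    if s = "" then pvCand (i + 1) rest
    else (PySem.Str.startswith s "[ToneSoul] Storage:", i, s) :: pvCand (i + 1) rest

-- Python tuple '<' on the candidates; the String component is never compared
-- because the index components are pairwise distinct, so comparing
-- (Bool, Nat) lexicographically is exact here.
def pvTupLt (c m : Bool × Nat × String) : Bool :=
  (!c.1 && m.1) || (c.1 == m.1 && decide (c.2.1 < m.2.1))

-- min(candidates): first element, then keep the smaller (first on ties), as Python's min
def normalize_compact_diagnostic_py_alt (text : String) : String :=
  match pvCand 0 (PySem.Str.splitlines text) with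
  | [] => ""
  | c :: cs => (cs.foldl (fun m x => if pvTupLt x m then x else m) c).2.2

-- ===== PRECONDITION & SPEC =====
def Spec_normalize_compact_diagnostic_py (text : String) (out : String) : Prop := out = normalize_compact_diagnostic_py_alt text
instance (text : String) (out : String) : Decidable (Spec_normalize_compact_diagnostic_py text out) := by unfold Spec_normalize_compact_diagnostic_py; infer_instance

-- ===== CLAIM (what is proved, stated in full; the proofs are below) =====
def Claim_equal_normalize_compact_diagnostic_py : Prop := ∀ (text : String), Dom_normalize_compact_diagnostic_py text → Spec_normalize_compact_diagnostic_py text (normalize_compact_diagnostic_py text)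

-- ===== LEMMAS AND PROOFS =====

-- a (false, j, s) accumulator with j below all following indices is never displaced
theorem pvFold_false (ls : List String) : ∀ (i j : Nat) (s : String), j < i →
    (pvCand i ls).foldl (fun m x => if pvTupLt x m then x else m) (false, j, s) = (false, j, s) := by
  induction ls with
  | nil => intro i j s _; rfl
  | cons l rest ih =>
    intro i j s hj
    by_cases hs : PySem.Str.strip l = ""
    · rw [show pvCand i (l :: rest) = pvCand (i + 1) rest from by simp [pvCand, hs]]
      exact ih (i + 1) j s (Nat.lt_succ_of_lt hj)
    · rw [show pvCand i (l :: rest)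
          = (PySem.Str.startswith (PySem.Str.strip l) "[ToneSoul] Storage:", i, PySem.Str.strip l)
            :: pvCand (i + 1) rest from by simp [pvCand, hs]]
      rw [List.foldl_cons]
      rw [show (if pvTupLt (PySem.Str.startswith (PySem.Str.strip l) "[ToneSoul] Storage:", i,
          PySem.Str.strip l) (false, j, s)
          then (PySem.Str.startswith (PySem.Str.strip l) "[ToneSoul] Storage:", i, PySem.Str.strip l)
          else ((false, j, s) : Bool × Nat × String)) = (false, j, s) from by
        simp [pvTupLt]
        intro _
        omega]
      exact ih (i + 1) j s (Nat.lt_succ_of_lt hj)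

-- with a (true, j, s) accumulator the fold returns the first non-storage candidate,
-- or keeps the accumulator when there is none
theorem pvFold_true (ls : List String) : ∀ (i j : Nat) (s : String), j < i →
    ((pvCand i ls).foldl (fun m x => if pvTupLt x m then x else m) (true, j, s)).2.2 =
      (match (((ls.filter (fun line => PySem.Str.strip line ≠ "")).map PySem.Str.strip).filter
          (fun line => ¬ (PySem.Str.startswith line "[ToneSoul] Storage:" = true))) with
        | f :: _ => f
        | [] => s) := by
  induction ls with
  | nil => intro i j s _; rfl
  | cons l rest ih =>
    intro i j s hj
    by_cases hs : PySem.Str.strip l = ""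
    · rw [show pvCand i (l :: rest) = pvCand (i + 1) rest from by simp [pvCand, hs]]
      rw [show (l :: rest).filter (fun line => PySem.Str.strip line ≠ "")
          = rest.filter (fun line => PySem.Str.strip line ≠ "") from by simp [List.filter_cons, hs]]
      exact ih (i + 1) j s (Nat.lt_succ_of_lt hj)
    · rw [show pvCand i (l :: rest)
          = (PySem.Str.startswith (PySem.Str.strip l) "[ToneSoul] Storage:", i, PySem.Str.strip l)
            :: pvCand (i + 1) rest from by simp [pvCand, hs]]
      rw [show (l :: rest).filter (fun line => PySem.Str.strip line ≠ "")
          = l :: rest.filter (fun line => PySem.Str.strip line ≠ "") from by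
        simp [List.filter_cons, hs]]
      rw [List.map_cons, List.filter_cons, List.foldl_cons]
      by_cases hp : PySem.Str.startswith (PySem.Str.strip l) "[ToneSoul] Storage:" = true
      · -- storage line: candidate loses to the accumulator (its index is larger)
        rw [hp]
        rw [show (if pvTupLt (true, i, PySem.Str.strip l) (true, j, s)
            then ((true, i, PySem.Str.strip l) : Bool × Nat × String)
            else (true, j, s)) = (true, j, s) from by simp [pvTupLt]; omega]
        rw [if_neg (by simpa using hp)]
        exact ih (i + 1) j s (Nat.lt_succ_of_lt hj)
      · -- non-storage line: it displaces the accumulator and then never loses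
        rw [show PySem.Str.startswith (PySem.Str.strip l) "[ToneSoul] Storage:" = false from by
          simpa using hp]
        rw [show (if pvTupLt (false, i, PySem.Str.strip l) (true, j, s)
            then ((false, i, PySem.Str.strip l) : Bool × Nat × String)
            else (true, j, s)) = (false, i, PySem.Str.strip l) from by simp [pvTupLt]]
        rw [pvFold_false rest (i + 1) i (PySem.Str.strip l) (Nat.lt_succ_self i)]
        rw [if_pos (by simpa using hp)]

-- the whole selection equals A's staged computation, for any start index
theorem pvSel_eq (ls : List String) : ∀ (i : Nat),
    (match pvCand i ls with
      | [] => ""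
      | c :: cs => (cs.foldl (fun m x => if pvTupLt x m then x else m) c).2.2) =
    (let lines := ((ls.filter (fun line => PySem.Str.strip line ≠ "")).map PySem.Str.strip)
     let filtered := lines.filter
        (fun line => ¬ (PySem.Str.startswith line "[ToneSoul] Storage:" = true))
     match filtered with
     | f :: _ => f
     | [] =>
       match lines with
       | l :: _ => l
       | [] => "") := by
  induction ls with
  | nil => intro i; rfl
  | cons l rest ih =>
    intro i
    by_cases hs : PySem.Str.strip l = ""
    · rw [show pvCand i (l :: rest) = pvCand (i + 1) rest from by simp [pvCand, hs]]
      rw [show (l :: rest).filter (fun line => PySem.Str.strip line ≠ "")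
          = rest.filter (fun line => PySem.Str.strip line ≠ "") from by simp [List.filter_cons, hs]]
      exact ih (i + 1)
    · rw [show pvCand i (l :: rest)
          = (PySem.Str.startswith (PySem.Str.strip l) "[ToneSoul] Storage:", i, PySem.Str.strip l)
            :: pvCand (i + 1) rest from by simp [pvCand, hs]]
      rw [show (l :: rest).filter (fun line => PySem.Str.strip line ≠ "")
          = l :: rest.filter (fun line => PySem.Str.strip line ≠ "") from by
        simp [List.filter_cons, hs]]
      simp only [List.map_cons, List.filter_cons]
      by_cases hp : PySem.Str.startswith (PySem.Str.strip l) "[ToneSoul] Storage:" = true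
      · rw [hp]
        rw [if_neg (by simpa using hp)]
        have := pvFold_true rest (i + 1) i (PySem.Str.strip l) (Nat.lt_succ_self i)
        simp only at this
        rw [this]
      · rw [show PySem.Str.startswith (PySem.Str.strip l) "[ToneSoul] Storage:" = false from by
          simpa using hp]
        rw [if_pos (by simpa using hp)]
        rw [pvFold_false rest (i + 1) i (PySem.Str.strip l) (Nat.lt_succ_self i)]

-- ===== VERDICT (by name: the statement is the Claim_ definition above) =====
theorem normalize_compact_diagnostic_py_spec : Claim_equal_normalize_compact_diagnostic_py := by
  intro text _
  unfold Spec_normalize_compact_diagnostic_py normalize_compact_diagnostic_py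
    normalize_compact_diagnostic_py_alt
  rw [pvSel_eq (PySem.Str.splitlines text) 0]
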